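-- pv_equiv track=rewrite | github.com/Sandutta2020/Python_basic | generator.py | generator_batch
-- ===== SOURCE A (Python) =====
-- def generator_batch(num):
--     lst =[]
--     while num > 0:
--         lst.append(num)
--         if len(lst)==20:
--             yield lst
--             lst =[]
--         num -=1
-- ===== SOURCE B (Python) =====
-- def generator_batch(num):
--     # closed-form batching: n full batches of 20, each built directly with range()
--     n = num // 20
--     for i in range(n):
--         start = num - 20 * i
--         yield list(range(start, start - 20, -1))
-- ===== Notes on version B (the rewrite author's own statement) =====
-- stated objective: simpler
-- what changed: B computes the number of full batches as num // 20 and emits each 20-element descending batch directly with range(start, start-20, -1), instead of A's one-at-a-time accumulator list with a length==20 check.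
import Mathlib
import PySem

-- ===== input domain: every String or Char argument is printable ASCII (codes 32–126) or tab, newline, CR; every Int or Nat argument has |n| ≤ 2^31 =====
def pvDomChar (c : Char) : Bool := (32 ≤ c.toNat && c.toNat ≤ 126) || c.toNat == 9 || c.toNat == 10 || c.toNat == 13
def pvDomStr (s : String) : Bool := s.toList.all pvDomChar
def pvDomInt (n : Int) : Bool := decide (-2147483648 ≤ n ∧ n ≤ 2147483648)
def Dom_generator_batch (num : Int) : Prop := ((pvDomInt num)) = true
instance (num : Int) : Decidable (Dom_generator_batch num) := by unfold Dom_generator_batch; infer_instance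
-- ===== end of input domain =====

-- B replaces A's element-by-element accumulator (append, check len==20, yield, reset)
-- by a closed-form batch count num // 20 with each batch produced directly as a range.

-- ===== PORT A =====
-- while num > 0: append num to lst; if len(lst)==20 yield lst and reset; num -= 1
-- fuel = num.toNat bounds the loop (num decreases by 1 each iteration; loop stops at num ≤ 0)
def generator_batchAux : Nat → Int → List Int → List (List Int)
  | 0, _, _ => []
  | f + 1, num, lst =>
    if num > 0 then
      let lst' := lst ++ [num]
      if lst'.length = 20 then lst' :: generator_batchAux f (num - 1) []
      else generator_batchAux f (num - 1) lst'
    else []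

def generator_batch (num : Int) : List (List Int) :=
  generator_batchAux num.toNat num []

-- ===== PORT B =====
-- n = num // 20; for i in range(n): yield list(range(num-20*i, num-20*i-20, -1))
def generator_batch_alt (num : Int) : List (List Int) :=
  (PySem.List.pyRange 0 (PySem.Int.floordiv num 20) 1).map
    (fun i => PySem.List.pyRange (num - 20 * i) (num - 20 * i - 20) (-1))

-- ===== PRECONDITION & SPEC =====
def Spec_generator_batch (num : Int) (out : List (List Int)) : Prop := out = generator_batch_alt num
instance (num : Int) (out : List (List Int)) : Decidable (Spec_generator_batch num out) := by unfold Spec_generator_batch; infer_instance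

-- ===== CLAIM (what is proved, stated in full; the proofs are below) =====
def Claim_equal_generator_batch : Prop := ∀ (num : Int), Dom_generator_batch num → Spec_generator_batch num (generator_batch num)

-- ===== LEMMAS AND PROOFS =====

-- A's loop yields nothing when fewer than 20 numbers remain to fill the current batch.
lemma aux_nil : ∀ (fuel : Nat) (num : Int) (lst : List Int),
    fuel = num.toNat → num.toNat + lst.length < 20 →
    generator_batchAux fuel num lst = [] := by
  intro fuel
  induction fuel with
  | zero => intro num lst _ _; rfl
  | succ f ih =>
    intro num lst hf h
    have hpos : num > 0 := by omega
    simp only [generator_batchAux, if_pos hpos]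
    have hlen : (lst ++ [num]).length ≠ 20 := by simp; omega
    rw [if_neg hlen]
    apply ih
    · omega
    · simp; omega

-- Descending the loop j more steps (1 ≤ j ≤ 20) with a batch missing exactly j elements
-- yields one batch and restarts empty at num - j.
lemma aux_step : ∀ (j : Nat) (num : Int) (lst : List Int),
    1 ≤ j → j ≤ 20 → lst.length + j = 20 → (j : Int) ≤ num →
    generator_batchAux num.toNat num lst =
      (lst ++ PySem.List.pyRange num (num - j) (-1)) ::
        generator_batchAux (num - j).toNat (num - j) [] := by
  intro j
  induction j with
  | zero => intro _ _ h1; omega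
  | succ j ih =>
    intro num lst _ hj20 hlen hnum
    have hpos : num > 0 := by push_cast at hnum; omega
    have hfuel : num.toNat = (num - 1).toNat + 1 := by omega
    rw [hfuel]
    simp only [generator_batchAux, if_pos hpos]
    by_cases hj : j = 0
    · subst hj
      have h20 : (lst ++ [num]).length = 20 := by simp; omega
      rw [if_pos h20]
      have hr : PySem.List.pyRange num (num - (1 : Nat)) (-1) = [num] := by
        rw [PySem.List.pyRange_neg_one_cons (by push_cast; omega)]
        rw [PySem.List.pyRange_neg_one_eq_nil (by push_cast; omega)]
      rw [hr]
      push_cast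
      simp
    · have hne : (lst ++ [num]).length ≠ 20 := by simp; omega
      rw [if_neg hne]
      have := ih (num - 1) (lst ++ [num]) (by omega) (by omega) (by simp; omega)
        (by push_cast at hnum ⊢; omega)
      rw [this]
      have he : num - 1 - (j : Int) = num - ((j : Nat) + 1 : Nat) := by push_cast; ring
      rw [he]
      have hr : PySem.List.pyRange num (num - ((j : Nat) + 1 : Nat)) (-1)
          = num :: PySem.List.pyRange (num - 1) (num - ((j : Nat) + 1 : Nat)) (-1) := by
        rw [PySem.List.pyRange_neg_one_cons (by push_cast; omega)]
      rw [hr]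
      simp

lemma floordiv_sub20 (num : Int) :
    PySem.Int.floordiv (num - 20) 20 = PySem.Int.floordiv num 20 - 1 := by
  rw [PySem.Int.floordiv_eq_ediv_of_pos (by norm_num),
      PySem.Int.floordiv_eq_ediv_of_pos (by norm_num)]
  omega

-- B's closed form satisfies the same recurrence: one batch then the rest from num - 20.
lemma alt_step (num : Int) (h : 20 ≤ num) :
    generator_batch_alt num =
      PySem.List.pyRange num (num - 20) (-1) :: generator_batch_alt (num - 20) := by
  unfold generator_batch_alt
  have hn : 0 < PySem.Int.floordiv num 20 := by
    rw [PySem.Int.floordiv_eq_ediv_of_pos (by norm_num)]; omega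
  rw [PySem.List.pyRange_one_cons hn]
  rw [floordiv_sub20]
  simp only [List.map_cons, mul_zero, sub_zero]
  congr 1
  rw [PySem.List.pyRange_one, PySem.List.pyRange_one]
  rw [List.map_map, List.map_map]
  simp only [zero_add, sub_zero]
  apply List.map_congr_left
  intro k _
  simp only [Function.comp_apply]
  congr 1 <;> ring

lemma alt_nil (num : Int) (h : num < 20) : generator_batch_alt num = [] := by
  unfold generator_batch_alt
  have : PySem.Int.floordiv num 20 ≤ 0 := by
    rw [PySem.Int.floordiv_eq_ediv_of_pos (by norm_num)]; omega
  rw [PySem.List.pyRange_one_eq_nil this]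
  rfl

lemma main_eq : ∀ (k : Nat) (num : Int), num.toNat ≤ k →
    generator_batch num = generator_batch_alt num := by
  intro k
  induction k using Nat.strong_induction_on with
  | _ k ih =>
    intro num hk
    by_cases h : num < 20
    · rw [alt_nil num h]
      unfold generator_batch
      exact aux_nil _ _ _ rfl (by simp; omega)
    · have h : 20 ≤ num := by omega
      have hstep := aux_step 20 num [] (by norm_num) (by norm_num) (by simp) (by push_cast; omega)
      unfold generator_batch
      simp only [List.nil_append] at hstep
      have h20 : ((20 : Nat) : Int) = 20 := by norm_num
      rw [h20] at hstep
      rw [hstep, alt_step num h]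
      congr 1
      have := ih (k - 1) (by omega) (num - 20) (by omega)
      unfold generator_batch at this
      exact this

-- ===== VERDICT (by name: the statement is the Claim_ definition above) =====
theorem generator_batch_spec : Claim_equal_generator_batch := by
  intro num _
  unfold Spec_generator_batch
  exact main_eq num.toNat num le_rfl
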